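-- pv_equiv track=rewrite | github.com/EduardoArgente13/python-practica-entrevistas | Beginner/Day9.py | shipment_analysis
-- ===== SOURCE A (Python) =====
-- def shipment_analysis(shipments):
--     if not shipments:
--         return {}
--
--     total_units = {}
--     products = {}
--     cities = {}
--     remainings = set()
--
--     for ship in shipments:
--         client, product, city, quantity, delivery_state = ship
--
--         total_units[client] = total_units.get(client, 0) + quantity
--
--         if client not in products:
--             products[client] = set()
--         products[client].add(product)
--
--         if client not in cities:
--             cities[client] = set()
--         cities[client].add(city)
--
--         if delivery_state == 'remaining':
--             remainings.add(client)
--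
--     res = []
--     for client in total_units:
--         if total_units[client] > 30 and len(cities[client]) > 1 and client not in remainings:
--             res.append(client)
--
--     return sorted(res)
-- ===== SOURCE B (Python) =====
-- def shipment_analysis(shipments):
--     # Nested-scan strategy: visit the distinct clients in sorted order and,
--     # for each, rescan the whole shipment list to aggregate; no dicts and no
--     # final sort (output is appended already in sorted order).
--     # (On the empty input A returns {} (a dict); this naturally returns [] -- excluded by Pre_.)
--     result = []
--     for client in sorted({s[0] for s in shipments}):
--         total = 0
--         cities = set()
--         ok = True
--         for c, _product, city, quantity, state in shipments:
--             if c == client: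
--                 total += quantity
--                 cities.add(city)
--                 if state == 'remaining':
--                     ok = False
--         if total > 30 and len(cities) > 1 and ok:
--             result.append(client)
--     return result
-- ===== Notes on version B (the rewrite author's own statement) =====
-- stated objective: alternative
-- what changed: Replaces A's single-pass hash aggregation (parallel dicts/sets keyed by client, then filter and sort) with a nested-scan algorithm: iterate the distinct clients in sorted order and rescan the full shipment list per client, so no aggregation dicts exist and no final sort is needed; trades O(n) aggregation for O(k*n) rescans.
-- outside the precondition, e.g. on shipment_analysis([]): A returns {}, B returns []
import Mathlib
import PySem

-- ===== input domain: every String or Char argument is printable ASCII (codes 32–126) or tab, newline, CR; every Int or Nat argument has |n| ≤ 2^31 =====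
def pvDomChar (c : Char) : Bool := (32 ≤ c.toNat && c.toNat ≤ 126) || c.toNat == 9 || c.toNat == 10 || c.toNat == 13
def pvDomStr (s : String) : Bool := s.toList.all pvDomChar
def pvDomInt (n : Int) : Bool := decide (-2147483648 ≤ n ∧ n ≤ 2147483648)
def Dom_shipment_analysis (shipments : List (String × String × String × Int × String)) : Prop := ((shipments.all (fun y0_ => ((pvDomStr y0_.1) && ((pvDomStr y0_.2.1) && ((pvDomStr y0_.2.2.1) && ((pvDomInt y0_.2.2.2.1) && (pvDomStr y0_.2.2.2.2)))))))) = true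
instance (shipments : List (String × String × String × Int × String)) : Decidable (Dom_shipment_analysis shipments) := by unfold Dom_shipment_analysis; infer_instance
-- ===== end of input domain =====

-- B replaces A's single-pass hash aggregation with nested scans over sorted distinct clients (alternative algorithm; return value only).


-- ===== PORT A =====
-- state: (total_units, products, cities, remainings)
def shipAStep (st : PySem.Dict String Int × PySem.Dict String (PySem.Set String) × PySem.Dict String (PySem.Set String) × PySem.Set String)
    (ship : String × String × String × Int × String) :
    PySem.Dict String Int × PySem.Dict String (PySem.Set String) × PySem.Dict String (PySem.Set String) × PySem.Set String :=
  let (total_units, products, cities, remainings) := st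
  let (client, product, city, quantity, delivery_state) := ship
  let total_units := total_units.insert client (total_units.getD client 0 + quantity)
  let products := if products.contains client then products else products.insert client PySem.Set.empty
  let products := products.modify client PySem.Set.empty (fun s => PySem.Set.add s product)
  let cities := if cities.contains client then cities else cities.insert client PySem.Set.empty
  let cities := cities.modify client PySem.Set.empty (fun s => PySem.Set.add s city)
  let remainings := if delivery_state == "remaining" then PySem.Set.add remainings client else remainings
  (total_units, products, cities, remainings)

def shipment_analysis (shipments : List (String × String × String × Int × String)) : List String :=
  -- on [] the Python returns {} (an empty dict, not a list); that input is excluded by Pre_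
  if shipments = [] then []
  else
    let st := shipments.foldl shipAStep (PySem.Dict.empty, PySem.Dict.empty, PySem.Dict.empty, PySem.Set.empty)
    let (total_units, _products, cities, remainings) := st
    let res := total_units.keys.foldl (fun res client =>
      if total_units.getD client 0 > 30 ∧ (cities.getD client PySem.Set.empty).length > 1 ∧ ¬ remainings.contains client
      then res ++ [client] else res) []
    PySem.List.sorted res (fun x => x) false

-- ===== PORT B =====
-- the inner rescan of B: fold over ALL shipments, acting only on this client's rows
def shipClientScan (shipments : List (String × String × String × Int × String)) (client : String) :
    Int × PySem.Set String × Bool :=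
  shipments.foldl (fun st s =>
    if s.1 == client then
      (st.1 + s.2.2.2.1, PySem.Set.add st.2.1 s.2.2.1,
       if s.2.2.2.2 == "remaining" then false else st.2.2)
    else st) (0, PySem.Set.empty, true)

def shipment_analysis_alt (shipments : List (String × String × String × Int × String)) : List String :=
  (PySem.List.sorted (PySem.Set.ofList (shipments.map (fun s => s.1))) (fun x => x) false).foldl
    (fun result client =>
      let st := shipClientScan shipments client
      if st.1 > 30 ∧ st.2.1.length > 1 ∧ st.2.2 then result ++ [client] else result) []

-- ===== PRECONDITION & SPEC =====
-- Pre_ excludes only the empty list, on which A returns {} (an empty dict), not a list of strings.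
def Pre_shipment_analysis (shipments : List (String × String × String × Int × String)) : Prop := shipments ≠ []
instance (shipments : List (String × String × String × Int × String)) : Decidable (Pre_shipment_analysis shipments) := by unfold Pre_shipment_analysis; infer_instance
def pvWitness_shipment_analysis : (List (String × String × String × Int × String)) := [("a", "p", "x", 31, "ok"), ("a", "p", "y", 1, "ok")]

def Spec_shipment_analysis (shipments : List (String × String × String × Int × String)) (out : List String) : Prop := out = shipment_analysis_alt shipments
instance (shipments : List (String × String × String × Int × String)) (out : List String) : Decidable (Spec_shipment_analysis shipments out) := by unfold Spec_shipment_analysis; infer_instance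

-- ===== CLAIM (what is proved, stated in full; the proofs are below) =====
def Claim_equal_shipment_analysis : Prop := ∀ (shipments : List (String × String × String × Int × String)), Dom_shipment_analysis shipments → Pre_shipment_analysis shipments → Spec_shipment_analysis shipments (shipment_analysis shipments)

-- ===== LEMMAS AND PROOFS =====

-- the canonical qualification predicate, phrased over the filtered shipment list of one client
def keyPred (shipments : List (String × String × String × Int × String)) (k : String) : Bool :=
  decide ((((shipments.filter (fun s => s.1 == k)).map (fun s => s.2.2.2.1)).sum > 30)
    ∧ ((PySem.Set.ofList ((shipments.filter (fun s => s.1 == k)).map (fun s => s.2.2.1))).length > 1)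
    ∧ ¬ ((shipments.filter (fun s => s.1 == k)).any (fun s => s.2.2.2.2 == "remaining")))

-- the single-component step functions shipAStep acts as on each state component
def stepTU (d : PySem.Dict String Int) (s : String × String × String × Int × String) : PySem.Dict String Int :=
  d.insert s.1 (d.getD s.1 0 + s.2.2.2.1)
def stepPR (d : PySem.Dict String (PySem.Set String)) (s : String × String × String × Int × String) : PySem.Dict String (PySem.Set String) :=
  (if d.contains s.1 then d else d.insert s.1 PySem.Set.empty).modify s.1 PySem.Set.empty (fun t => PySem.Set.add t s.2.1)
def stepCI (d : PySem.Dict String (PySem.Set String)) (s : String × String × String × Int × String) : PySem.Dict String (PySem.Set String) :=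
  (if d.contains s.1 then d else d.insert s.1 PySem.Set.empty).modify s.1 PySem.Set.empty (fun t => PySem.Set.add t s.2.2.1)
def stepREM (r : PySem.Set String) (s : String × String × String × Int × String) : PySem.Set String :=
  if s.2.2.2.2 == "remaining" then PySem.Set.add r s.1 else r

theorem foldA_decomp (l : List (String × String × String × Int × String)) :
    ∀ tu pr ci rem, List.foldl shipAStep (tu, pr, ci, rem) l =
      (List.foldl stepTU tu l, List.foldl stepPR pr l, List.foldl stepCI ci l, List.foldl stepREM rem l) := by
  induction l with
  | nil => intro tu pr ci rem; rfl
  | cons s t ih =>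
      intro tu pr ci rem
      obtain ⟨a, b, c, q, ds⟩ := s
      simp only [List.foldl_cons]
      rw [show shipAStep (tu, pr, ci, rem) (a, b, c, q, ds) =
        (stepTU tu (a, b, c, q, ds), stepPR pr (a, b, c, q, ds), stepCI ci (a, b, c, q, ds), stepREM rem (a, b, c, q, ds)) from rfl]
      exact ih _ _ _ _

theorem foldTU_getD (l : List (String × String × String × Int × String)) :
    ∀ (d : PySem.Dict String Int) (c : String),
      (List.foldl stepTU d l).getD c 0 =
        d.getD c 0 + ((l.filter (fun s => s.1 == c)).map (fun s => s.2.2.2.1)).sum := by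
  induction l with
  | nil => intro d c; simp
  | cons s t ih =>
      intro d c
      obtain ⟨a, b, c', q, ds⟩ := s
      simp only [List.foldl_cons]
      rw [ih]
      by_cases h : a = c
      · subst h
        simp [stepTU, add_assoc]
      · simp [stepTU, PySem.Dict.getD_insert, Ne.symm h, h]

theorem stepCI_getD (d : PySem.Dict String (PySem.Set String)) (s : String × String × String × Int × String) (c : String) :
    (stepCI d s).getD c PySem.Set.empty =
      if c = s.1 then PySem.Set.add (d.getD s.1 PySem.Set.empty) s.2.2.1 else d.getD c PySem.Set.empty := by
  unfold stepCI
  rw [PySem.Dict.getD_modify]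
  by_cases h : c = s.1
  · simp only [h]
    by_cases hc : d.contains s.1
    · simp [hc]
    · simp only [Bool.not_eq_true] at hc
      rw [PySem.Dict.getD_of_not_contains d _ hc]
      simp [hc]
  · simp only [if_neg h]
    by_cases hc : d.contains s.1
    · simp [hc]
    · simp only [Bool.not_eq_true] at hc
      simp [hc, PySem.Dict.getD_insert, h]

theorem foldCI_getD (l : List (String × String × String × Int × String)) :
    ∀ (d : PySem.Dict String (PySem.Set String)) (c : String),
      (List.foldl stepCI d l).getD c PySem.Set.empty =
        PySem.Set.update (d.getD c PySem.Set.empty) ((l.filter (fun s => s.1 == c)).map (fun s => s.2.2.1)) := by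
  induction l with
  | nil => intro d c; rfl
  | cons s t ih =>
      intro d c
      simp only [List.foldl_cons]
      rw [ih, stepCI_getD]
      by_cases h : s.1 = c
      · simp [h, PySem.Set.update_cons]
      · have h' : ¬ c = s.1 := fun hc => h hc.symm
        simp [h, h']

theorem foldREM_mem (l : List (String × String × String × Int × String)) :
    ∀ (r : PySem.Set String) (c : String),
      (c ∈ List.foldl stepREM r l) ↔ (c ∈ r ∨ l.any (fun s => s.1 == c && s.2.2.2.2 == "remaining")) := by
  induction l with
  | nil => intro r c; simp
  | cons s t ih =>
      intro r c
      simp only [List.foldl_cons, List.any_cons]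
      rw [ih]
      unfold stepREM
      by_cases h : s.2.2.2.2 = "remaining"
      · simp only [h, beq_self_eq_true, if_pos]
        rw [PySem.Set.mem_add]
        simp [@eq_comm String c]
        all_goals tauto
      · have : (s.2.2.2.2 == "remaining") = false := beq_eq_false_iff_ne.mpr h
        simp [this]

theorem foldTU_keys (l : List (String × String × String × Int × String)) :
    (List.foldl stepTU PySem.Dict.empty l).keys = PySem.Set.ofList (l.map (fun s => s.1)) := by
  unfold stepTU
  rw [PySem.Dict.keys_foldl_insert_key l (fun s => s.1) (fun d s => d.getD s.1 0 + s.2.2.2.1)]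
  simp [PySem.Set.update_nil_left]

-- A's qualification test on client k is keyPred
theorem predA_eq (shipments : List (String × String × String × Int × String)) (k : String) :
    decide ((List.foldl stepTU PySem.Dict.empty shipments).getD k 0 > 30
        ∧ ((List.foldl stepCI PySem.Dict.empty shipments).getD k PySem.Set.empty).length > 1
        ∧ ¬ (List.foldl stepREM PySem.Set.empty shipments).contains k)
      = keyPred shipments k := by
  have htu := foldTU_getD shipments PySem.Dict.empty k
  have hci := foldCI_getD shipments PySem.Dict.empty k
  have hrem : (List.foldl stepREM PySem.Set.empty shipments).contains k
      = (shipments.filter (fun s => s.1 == k)).any (fun s => s.2.2.2.2 == "remaining") := by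
    rw [Bool.eq_iff_iff, PySem.Set.contains_iff, foldREM_mem, List.any_filter]
    simp [PySem.Set.empty]
  rw [htu, hci, hrem]
  unfold keyPred
  rw [Bool.eq_iff_iff]
  simp [decide_eq_true_eq, PySem.Set.update_nil_left]

-- B's inner rescan computes the same three aggregates over the client's filtered rows
theorem shipClientScan_eq (shipments : List (String × String × String × Int × String)) (k : String) :
    shipClientScan shipments k =
      (((shipments.filter (fun s => s.1 == k)).map (fun s => s.2.2.2.1)).sum,
       PySem.Set.ofList ((shipments.filter (fun s => s.1 == k)).map (fun s => s.2.2.1)),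
       !((shipments.filter (fun s => s.1 == k)).any (fun s => s.2.2.2.2 == "remaining"))) := by
  unfold shipClientScan
  rw [PySem.List.foldl_if_eq_foldl_filter]
  induction (shipments.filter (fun s => s.1 == k)) using List.reverseRecOn with
  | nil => rfl
  | append_singleton t s ih =>
      simp only [List.foldl_append, List.foldl_cons, List.foldl_nil, ih,
        List.map_append, List.any_append, List.sum_append]
      obtain ⟨a, b, c, q, ds⟩ := s
      simp only [List.map_cons, List.map_nil, List.sum_cons, List.sum_nil, List.any_cons, List.any_nil]
      refine Prod.ext (by ring) (Prod.ext ?_ ?_)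
      · simp [PySem.Set.ofList_eq_foldl]
      · by_cases h : ds = "remaining" <;> simp [h]

-- sorting the distinct clients and then filtering equals filtering and then sorting
theorem filter_sorted_comm (l : List String) (p : String → Bool) :
    List.filter p (PySem.List.sorted (PySem.Set.ofList l) (fun x => x) false) =
      PySem.List.sorted (List.filter p (PySem.Set.ofList l)) (fun x => x) false := by
  have h1 : (List.filter p (PySem.List.sorted (PySem.Set.ofList l) (fun x => x) false)).Perm
      (List.filter p (PySem.Set.ofList l)) := (PySem.List.sorted_perm _ _ _).filter p
  have h2 : (List.filter p (PySem.List.sorted (PySem.Set.ofList l) (fun x => x) false)).Pairwise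
      (fun a b => a < b) := (PySem.List.sorted_ofList_pairwise_lt l).filter p
  exact (PySem.List.sorted_eq_of_perm_of_pairwise_lt _ _ (fun x => x) h1 h2).symm

theorem shipment_analysis_eq (shipments : List (String × String × String × Int × String))
    (h : shipments ≠ []) : shipment_analysis shipments = shipment_analysis_alt shipments := by
  unfold shipment_analysis shipment_analysis_alt
  rw [if_neg h]
  rw [show (PySem.Dict.empty, PySem.Dict.empty, PySem.Dict.empty, PySem.Set.empty)
      = ((PySem.Dict.empty : PySem.Dict String Int), (PySem.Dict.empty : PySem.Dict String (PySem.Set String)),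
         (PySem.Dict.empty : PySem.Dict String (PySem.Set String)), (PySem.Set.empty : PySem.Set String)) from rfl]
  rw [foldA_decomp]
  simp only []
  -- A's append loop is a filter by keyPred over its dict keys
  rw [show (fun (res : List String) (client : String) =>
        if (List.foldl stepTU PySem.Dict.empty shipments).getD client 0 > 30
            ∧ ((List.foldl stepCI PySem.Dict.empty shipments).getD client PySem.Set.empty).length > 1
            ∧ ¬ (List.foldl stepREM PySem.Set.empty shipments).contains client
        then res ++ [client] else res)
      = (fun res client => if keyPred shipments client = true then res ++ [client] else res) from by
        funext res client
        rw [← predA_eq shipments client]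
        simp
    , PySem.List.foldl_append_if_eq_filter, foldTU_keys]
  -- B's loop is a filter by keyPred over the sorted keys
  rw [show (fun (result : List String) (client : String) =>
        let st := shipClientScan shipments client
        if st.1 > 30 ∧ st.2.1.length > 1 ∧ st.2.2 then result ++ [client] else result)
      = (fun result client => if keyPred shipments client = true then result ++ [client] else result) from by
        funext result client
        rw [shipClientScan_eq]
        unfold keyPred
        simp only [decide_eq_true_eq, Bool.not_eq_true, Bool.not_eq_true']
    , PySem.List.foldl_append_if_eq_filter]
  simp only [List.nil_append]
  exact (filter_sorted_comm _ _).symm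

-- ===== VERDICT (by name: the statement is the Claim_ definition above) =====
theorem shipment_analysis_spec : Claim_equal_shipment_analysis := by
  intro shipments _ hpre
  unfold Spec_shipment_analysis
  exact shipment_analysis_eq shipments hpre
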